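-- pv_equiv track=rewrite | github.com/pastorcmentarny/denva | src/denva/denva_sensors_service.py | count_warnings
-- ===== SOURCE A (Python) =====
-- def count_warnings(warnings) -> dict:
--     warning_counter = {
--         'the': 0,
--         'thw': 0,
--         'tle': 0,
--         'tlw': 0,
--         'hhe': 0,
--         'hhw': 0,
--         'hle': 0,
--         'hlw': 0,
--         'cthf': 0,
--         'cthe': 0,
--         'cthw': 0,
--         'uvaw': 0,
--         'uvbw': 0,
--         'fsl': 0,
--         'dfsl': 0,
--         'dsl': 0,
--         'cow': 0,
--         'iqe': 0,
--         'iqw': 0,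
--         'cal': 0,  # co2 above level
--         'cwl': 0,
--         'cdl': 0
--     }
--
--     for warning in warnings:
--         if '[cthf]' in warning:
--             warning_counter['cthf'] += 1
--         elif '[cthe]' in warning:
--             warning_counter['cthe'] += 1
--         elif '[cthw]' in warning:
--             warning_counter['cthw'] += 1
--         elif '[the]' in warning:
--             warning_counter['the'] += 1
--         elif '[thw]' in warning:
--             warning_counter['thw'] += 1
--         elif '[tlw]' in warning:
--             warning_counter['tlw'] += 1
--         elif '[tle]' in warning:
--             warning_counter['tle'] += 1
--         elif '[hhe]' in warning:
--             warning_counter['hhe'] += 1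
--         elif '[hhw]' in warning:
--             warning_counter['hhw'] += 1
--         elif '[hlw]' in warning:
--             warning_counter['hlw'] += 1
--         elif '[hle]' in warning:
--             warning_counter['hle'] += 1
--         elif '[uvaw]' in warning:
--             warning_counter['uvaw'] += 1
--         elif '[uvbw]' in warning:
--             warning_counter['uvbw'] += 1
--         elif '[fsl]' in warning:
--             warning_counter['fsl'] += 1
--         elif '[dfsl]' in warning:
--             warning_counter['dfsl'] += 1
--         elif '[dsl]' in warning:
--             warning_counter['dsl'] += 1
--         elif '[cow]' in warning:
--             warning_counter['cow'] += 1
--         elif '[iqw]' in warning: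
--             warning_counter['iqw'] += 1
--         elif '[iqe]' in warning:
--             warning_counter['iqe'] += 1
--         elif '[cal]' in warning:
--             warning_counter['cal'] += 1
--         elif '[cwl]' in warning:
--             warning_counter['cwl'] += 1
--         elif '[cdl]' in warning:
--             warning_counter['cdl'] += 1
--
--     return warning_counter
-- ===== SOURCE B (Python) =====
-- # B: sieve by staged passes — for each tag in priority order, count the still-unclaimed
-- # warnings containing it and remove them from the pool (22 filtering passes over a
-- # shrinking list), instead of A's single pass with a 22-branch elif chain per warning.
--
-- _KEYS = ['the', 'thw', 'tle', 'tlw', 'hhe', 'hhw', 'hle', 'hlw', 'cthf', 'cthe',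
--          'cthw', 'uvaw', 'uvbw', 'fsl', 'dfsl', 'dsl', 'cow', 'iqe', 'iqw',
--          'cal', 'cwl', 'cdl']
--
-- # priority order of the tags, verbatim from the spec
-- _TAGS = [('[cthf]', 'cthf'), ('[cthe]', 'cthe'), ('[cthw]', 'cthw'),
--          ('[the]', 'the'), ('[thw]', 'thw'), ('[tlw]', 'tlw'), ('[tle]', 'tle'),
--          ('[hhe]', 'hhe'), ('[hhw]', 'hhw'), ('[hlw]', 'hlw'), ('[hle]', 'hle'),
--          ('[uvaw]', 'uvaw'), ('[uvbw]', 'uvbw'), ('[fsl]', 'fsl'),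
--          ('[dfsl]', 'dfsl'), ('[dsl]', 'dsl'), ('[cow]', 'cow'),
--          ('[iqw]', 'iqw'), ('[iqe]', 'iqe'), ('[cal]', 'cal'),
--          ('[cwl]', 'cwl'), ('[cdl]', 'cdl')]
--
--
-- def count_warnings(warnings) -> dict:
--     counter = {k: 0 for k in _KEYS}
--     remaining = list(warnings)
--     for sub, key in _TAGS:
--         # a warning is claimed by the highest-priority tag it contains:
--         # earlier passes already removed warnings claimed by higher-priority tags
--         counter[key] = sum(1 for w in remaining if sub in w)
--         remaining = [w for w in remaining if sub not in w]
--     return counter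
-- ===== Notes on version B (the rewrite author's own statement) =====
-- stated objective: alternative
-- what changed: Interchanges the loops: instead of one pass over warnings with a 22-branch first-match elif chain, B makes 22 staged passes, one per tag in priority order, counting the remaining warnings that contain the tag and filtering them out of the pool, so precedence is realized by list shrinking rather than branch order.
import Mathlib
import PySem

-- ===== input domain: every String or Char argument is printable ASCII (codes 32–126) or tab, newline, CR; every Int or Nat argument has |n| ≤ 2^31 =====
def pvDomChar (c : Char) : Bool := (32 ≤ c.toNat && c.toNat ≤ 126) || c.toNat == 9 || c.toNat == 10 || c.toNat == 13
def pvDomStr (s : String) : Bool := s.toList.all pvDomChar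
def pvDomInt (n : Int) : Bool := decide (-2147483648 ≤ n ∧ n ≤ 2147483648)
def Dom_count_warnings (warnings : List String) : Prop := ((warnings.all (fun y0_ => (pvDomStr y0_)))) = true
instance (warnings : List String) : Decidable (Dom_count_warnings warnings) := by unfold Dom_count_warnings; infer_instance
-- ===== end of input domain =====

-- B counts by 22 staged partition passes over a shrinking pool (one pass per tag in
-- priority order, assigning the count and filtering matches out) instead of A's single
-- pass with a 22-branch first-match elif chain (objective: alternative).

-- ===== PORT A =====
-- body of A's for-loop: the 22-branch elif chain (counter[k] += 1 on a key that
-- is always present ≡ modify k 0 (+1))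
def pvStepA (d : PySem.Dict String Int) (w : String) : PySem.Dict String Int :=
    if PySem.Str.isIn "[cthf]" w then d.modify "cthf" 0 (· + 1)
    else if PySem.Str.isIn "[cthe]" w then d.modify "cthe" 0 (· + 1)
    else if PySem.Str.isIn "[cthw]" w then d.modify "cthw" 0 (· + 1)
    else if PySem.Str.isIn "[the]" w then d.modify "the" 0 (· + 1)
    else if PySem.Str.isIn "[thw]" w then d.modify "thw" 0 (· + 1)
    else if PySem.Str.isIn "[tlw]" w then d.modify "tlw" 0 (· + 1)
    else if PySem.Str.isIn "[tle]" w then d.modify "tle" 0 (· + 1)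
    else if PySem.Str.isIn "[hhe]" w then d.modify "hhe" 0 (· + 1)
    else if PySem.Str.isIn "[hhw]" w then d.modify "hhw" 0 (· + 1)
    else if PySem.Str.isIn "[hlw]" w then d.modify "hlw" 0 (· + 1)
    else if PySem.Str.isIn "[hle]" w then d.modify "hle" 0 (· + 1)
    else if PySem.Str.isIn "[uvaw]" w then d.modify "uvaw" 0 (· + 1)
    else if PySem.Str.isIn "[uvbw]" w then d.modify "uvbw" 0 (· + 1)
    else if PySem.Str.isIn "[fsl]" w then d.modify "fsl" 0 (· + 1)
    else if PySem.Str.isIn "[dfsl]" w then d.modify "dfsl" 0 (· + 1)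
    else if PySem.Str.isIn "[dsl]" w then d.modify "dsl" 0 (· + 1)
    else if PySem.Str.isIn "[cow]" w then d.modify "cow" 0 (· + 1)
    else if PySem.Str.isIn "[iqw]" w then d.modify "iqw" 0 (· + 1)
    else if PySem.Str.isIn "[iqe]" w then d.modify "iqe" 0 (· + 1)
    else if PySem.Str.isIn "[cal]" w then d.modify "cal" 0 (· + 1)
    else if PySem.Str.isIn "[cwl]" w then d.modify "cwl" 0 (· + 1)
    else if PySem.Str.isIn "[cdl]" w then d.modify "cdl" 0 (· + 1)
    else d

def count_warnings (warnings : List String) : List (String × Int) :=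
  let warning_counter : PySem.Dict String Int := PySem.Dict.ofList
    [("the", 0), ("thw", 0), ("tle", 0), ("tlw", 0), ("hhe", 0), ("hhw", 0),
     ("hle", 0), ("hlw", 0), ("cthf", 0), ("cthe", 0), ("cthw", 0), ("uvaw", 0),
     ("uvbw", 0), ("fsl", 0), ("dfsl", 0), ("dsl", 0), ("cow", 0), ("iqe", 0),
     ("iqw", 0), ("cal", 0), ("cwl", 0), ("cdl", 0)]
  (warnings.foldl pvStepA warning_counter).items

-- ===== PORT B =====
def pvKeys : List String :=
  ["the", "thw", "tle", "tlw", "hhe", "hhw", "hle", "hlw", "cthf", "cthe",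
   "cthw", "uvaw", "uvbw", "fsl", "dfsl", "dsl", "cow", "iqe", "iqw",
   "cal", "cwl", "cdl"]

def pvTags : List (String × String) :=
  [("[cthf]", "cthf"), ("[cthe]", "cthe"), ("[cthw]", "cthw"),
   ("[the]", "the"), ("[thw]", "thw"), ("[tlw]", "tlw"), ("[tle]", "tle"),
   ("[hhe]", "hhe"), ("[hhw]", "hhw"), ("[hlw]", "hlw"), ("[hle]", "hle"),
   ("[uvaw]", "uvaw"), ("[uvbw]", "uvbw"), ("[fsl]", "fsl"),
   ("[dfsl]", "dfsl"), ("[dsl]", "dsl"), ("[cow]", "cow"),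
   ("[iqw]", "iqw"), ("[iqe]", "iqe"), ("[cal]", "cal"),
   ("[cwl]", "cwl"), ("[cdl]", "cdl")]

-- body of B's for-loop over the tag table: assign the count of matching remaining
-- warnings and filter them out of the pool
def pvStepB (st : PySem.Dict String Int × List String) (p : String × String) :
    PySem.Dict String Int × List String :=
  (st.1.insert p.2 ((st.2.countP (fun w => PySem.Str.isIn p.1 w) : Nat) : Int),
   st.2.filter (fun w => ! PySem.Str.isIn p.1 w))

def count_warnings_alt (warnings : List String) : List (String × Int) :=
  let counter : PySem.Dict String Int :=
    PySem.Dict.ofList (pvKeys.map (fun k => (k, (0 : Int))))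
  (pvTags.foldl pvStepB (counter, warnings)).1.items

-- ===== PRECONDITION & SPEC =====
def Spec_count_warnings (warnings : List String) (out : List (String × Int)) : Prop := out = count_warnings_alt warnings
instance (warnings : List String) (out : List (String × Int)) : Decidable (Spec_count_warnings warnings out) := by unfold Spec_count_warnings; infer_instance

-- ===== CLAIM (what is proved, stated in full; the proofs are below) =====
def Claim_equal_count_warnings : Prop := ∀ (warnings : List String), Dom_count_warnings warnings → Spec_count_warnings warnings (count_warnings warnings)

-- ===== LEMMAS AND PROOFS =====

-- proof-side: the first tag (by priority) of table tbl occurring in w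
def pvFtag (tbl : List (String × String)) (w : String) : Option String :=
  (tbl.find? (fun p => PySem.Str.isIn p.1 w)).map (·.2)

-- A's elif chain IS the first-match over the priority table
set_option maxHeartbeats 2000000 in
theorem pv_stepA_eq (d : PySem.Dict String Int) (w : String) :
    pvStepA d w = match pvFtag pvTags w with
      | some t => d.modify t 0 (· + 1)
      | none => d := by
  unfold pvStepA pvFtag pvTags
  simp only [List.find?]
  cases h0 : PySem.Str.isIn "[cthf]" w
  · cases h1 : PySem.Str.isIn "[cthe]" w
    · cases h2 : PySem.Str.isIn "[cthw]" w
      · cases h3 : PySem.Str.isIn "[the]" w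
        · cases h4 : PySem.Str.isIn "[thw]" w
          · cases h5 : PySem.Str.isIn "[tlw]" w
            · cases h6 : PySem.Str.isIn "[tle]" w
              · cases h7 : PySem.Str.isIn "[hhe]" w
                · cases h8 : PySem.Str.isIn "[hhw]" w
                  · cases h9 : PySem.Str.isIn "[hlw]" w
                    · cases h10 : PySem.Str.isIn "[hle]" w
                      · cases h11 : PySem.Str.isIn "[uvaw]" w
                        · cases h12 : PySem.Str.isIn "[uvbw]" w
                          · cases h13 : PySem.Str.isIn "[fsl]" w
                            · cases h14 : PySem.Str.isIn "[dfsl]" w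
                              · cases h15 : PySem.Str.isIn "[dsl]" w
                                · cases h16 : PySem.Str.isIn "[cow]" w
                                  · cases h17 : PySem.Str.isIn "[iqw]" w
                                    · cases h18 : PySem.Str.isIn "[iqe]" w
                                      · cases h19 : PySem.Str.isIn "[cal]" w
                                        · cases h20 : PySem.Str.isIn "[cwl]" w
                                          · cases h21 : PySem.Str.isIn "[cdl]" w
                                            · simp
                                            · simp
                                          · simp
                                        · simp
                                      · simp
                                    · simp
                                  · simp
                                · simp
                              · simp
                            · simp
                          · simp
                        · simp
                      · simp
                    · simp
                  · simp
                · simp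
              · simp
            · simp
          · simp
        · simp
      · simp
    · simp
  · simp

theorem pv_ftag_mem {tbl : List (String × String)} {w t : String}
    (h : pvFtag tbl w = some t) : t ∈ tbl.map (·.2) := by
  rw [pvFtag] at h
  rcases hf : tbl.find? (fun p => PySem.Str.isIn p.1 w) with _ | p
  · rw [hf] at h; cases h
  · rw [hf, Option.map_some] at h
    injection h with h
    exact h ▸ List.mem_map_of_mem (List.mem_of_find?_eq_some hf)

-- cons-step characterisations of pvFtag, used on both sides
theorem pv_ftag_cons_pos {s : String} (t : String) (rest : List (String × String))
    {w : String} (hs : PySem.Str.isIn s w = true) :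
    pvFtag ((s, t) :: rest) w = some t := by
  have hs' : PySem.Chars.isIn s.toList w.toList = true := by simpa using hs
  simp [pvFtag, hs']

theorem pv_ftag_cons_neg {s : String} (t : String) (rest : List (String × String))
    {w : String} (hs : PySem.Str.isIn s w = false) :
    pvFtag ((s, t) :: rest) w = pvFtag rest w := by
  have hs' : PySem.Chars.isIn s.toList w.toList = false := by simpa using hs
  simp [pvFtag, hs']

-- A-side: the final count of key k is its start value plus the number of warnings
-- whose first matching tag is k
theorem pv_getA (ws : List String) (d : PySem.Dict String Int) (k : String) :
    (ws.foldl pvStepA d).getD k 0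
      = d.getD k 0 + ((ws.countP (fun w => pvFtag pvTags w == some k) : Nat) : Int) := by
  induction ws generalizing d with
  | nil => simp
  | cons w ws ih =>
      rw [List.foldl_cons, ih, pv_stepA_eq]
      cases h : pvFtag pvTags w with
      | none => simp [h]
      | some t =>
          by_cases hk : k = t
          · subst hk
            rw [PySem.Dict.getD_modify, if_pos rfl]
            simp [h]
            ring
          · rw [PySem.Dict.getD_modify, if_neg hk]
            simp [h, Ne.symm hk]

theorem pv_keysA (ws : List String) (d : PySem.Dict String Int)
    (hc : ∀ t ∈ pvTags.map (·.2), d.contains t = true) :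
    (ws.foldl pvStepA d).keys = d.keys := by
  induction ws generalizing d with
  | nil => rfl
  | cons w ws ih =>
      rw [List.foldl_cons, pv_stepA_eq]
      cases h : pvFtag pvTags w with
      | none => exact ih d hc
      | some t =>
          have ht := hc t (pv_ftag_mem h)
          have hc' : ∀ t' ∈ pvTags.map (·.2), (d.modify t 0 (· + 1)).contains t' = true := by
            intro t' ht'
            rw [PySem.Dict.contains_modify]
            simp [hc t' ht']
          rw [ih _ hc', PySem.Dict.keys_modify,
              PySem.Dict.keys_insert_of_contains _ _ ht]

-- B-side: after the staged passes, key k holds the number of pool members whose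
-- first matching tag (within tbl) is k
theorem pv_getB (tbl : List (String × String)) (d : PySem.Dict String Int)
    (rem : List String) (k : String) (hnd : (tbl.map (·.2)).Nodup) :
    ((tbl.foldl pvStepB (d, rem)).1).getD k 0
      = if k ∈ tbl.map (·.2)
        then ((rem.countP (fun w => pvFtag tbl w == some k) : Nat) : Int)
        else d.getD k 0 := by
  induction tbl generalizing d rem with
  | nil => simp
  | cons p rest ih =>
      obtain ⟨s, t⟩ := p
      simp only [List.map_cons, List.nodup_cons] at hnd
      rw [List.foldl_cons]
      have hstep : pvStepB (d, rem) (s, t)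
          = (d.insert t ((rem.countP (fun w => PySem.Str.isIn s w) : Nat) : Int),
             rem.filter (fun w => ! PySem.Str.isIn s w)) := rfl
      rw [hstep, ih _ _ hnd.2]
      by_cases hkr : k ∈ rest.map (·.2)
      · have hkt : k ≠ t := fun he => hnd.1 (he ▸ hkr)
        rw [if_pos hkr, if_pos (by simp [hkr]), List.countP_filter]
        congr 1
        refine List.countP_congr (fun w _ => ?_)
        cases hs : PySem.Str.isIn s w
        · rw [pv_ftag_cons_neg t rest hs]
          simp
        · rw [pv_ftag_cons_pos t rest hs]
          simp [Ne.symm hkt]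
      · rw [if_neg hkr]
        by_cases hkt : k = t
        · subst hkt
          rw [if_pos (by simp), PySem.Dict.getD_insert, if_pos rfl]
          congr 1
          refine List.countP_congr (fun w _ => ?_)
          cases hs : PySem.Str.isIn s w
          · rw [pv_ftag_cons_neg k rest hs]
            have hne : pvFtag rest w ≠ some k := fun h => hkr (pv_ftag_mem h)
            simp [hne]
          · rw [pv_ftag_cons_pos k rest hs]
            simp
        · rw [if_neg (by simp [hkt, hkr]), PySem.Dict.getD_insert, if_neg hkt]

theorem pv_keysB (tbl : List (String × String)) (d : PySem.Dict String Int)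
    (rem : List String) (hc : ∀ p ∈ tbl, d.contains p.2 = true) :
    ((tbl.foldl pvStepB (d, rem)).1).keys = d.keys := by
  induction tbl generalizing d rem with
  | nil => rfl
  | cons p rest ih =>
      obtain ⟨s, t⟩ := p
      rw [List.foldl_cons]
      have hstep : pvStepB (d, rem) (s, t)
          = (d.insert t ((rem.countP (fun w => PySem.Str.isIn s w) : Nat) : Int),
             rem.filter (fun w => ! PySem.Str.isIn s w)) := rfl
      rw [hstep]
      have hc' : ∀ q ∈ rest,
          (d.insert t ((rem.countP (fun w => PySem.Str.isIn s w) : Nat) : Int)).contains q.2 = true := by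
        intro q hq
        rw [PySem.Dict.contains_insert]
        simp [hc q (List.mem_cons_of_mem _ hq)]
      rw [ih _ _ hc',
          PySem.Dict.keys_insert_of_contains _ _ (hc (s, t) (by simp))]

-- ===== VERDICT (by name: the statement is the Claim_ definition above) =====
theorem count_warnings_spec : Claim_equal_count_warnings := by
  intro ws _
  show (List.foldl pvStepA (PySem.Dict.ofList
    [("the", (0 : Int)), ("thw", 0), ("tle", 0), ("tlw", 0), ("hhe", 0), ("hhw", 0),
     ("hle", 0), ("hlw", 0), ("cthf", 0), ("cthe", 0), ("cthw", 0), ("uvaw", 0),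
     ("uvbw", 0), ("fsl", 0), ("dfsl", 0), ("dsl", 0), ("cow", 0), ("iqe", 0),
     ("iqw", 0), ("cal", 0), ("cwl", 0), ("cdl", 0)]) ws).items
    = ((List.foldl pvStepB
        (PySem.Dict.ofList (pvKeys.map (fun k => (k, (0 : Int)))), ws) pvTags).1).items
  have hd : PySem.Dict.ofList
      [("the", (0 : Int)), ("thw", 0), ("tle", 0), ("tlw", 0), ("hhe", 0), ("hhw", 0),
       ("hle", 0), ("hlw", 0), ("cthf", 0), ("cthe", 0), ("cthw", 0), ("uvaw", 0),
       ("uvbw", 0), ("fsl", 0), ("dfsl", 0), ("dsl", 0), ("cow", 0), ("iqe", 0),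
       ("iqw", 0), ("cal", 0), ("cwl", 0), ("cdl", 0)]
      = PySem.Dict.ofList (pvKeys.map (fun k => (k, (0 : Int)))) := by decide
  rw [hd]
  have hcont : ∀ t ∈ pvTags.map (·.2),
      (PySem.Dict.ofList (pvKeys.map (fun k => (k, (0 : Int))))).contains t = true := by decide
  have hcontP : ∀ p ∈ pvTags,
      (PySem.Dict.ofList (pvKeys.map (fun k => (k, (0 : Int))))).contains p.2 = true := by decide
  have hkeys : (PySem.Dict.ofList (pvKeys.map (fun k => (k, (0 : Int))))).keys = pvKeys := by decide
  have hnodK : pvKeys.Nodup := by decide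
  have hnodT : (pvTags.map (·.2)).Nodup := by decide
  have hzero : ∀ k ∈ pvKeys,
      (PySem.Dict.ofList (pvKeys.map (fun k => (k, (0 : Int))))).getD k 0 = 0
        ∧ k ∈ pvTags.map (·.2) := by decide
  have hKA := (pv_keysA ws _ hcont).trans hkeys
  have hKB := (pv_keysB pvTags _ ws hcontP).trans hkeys
  rw [PySem.Dict.items_eq_map_keys _ (by rw [hKA]; exact hnodK) 0,
      PySem.Dict.items_eq_map_keys _ (by rw [hKB]; exact hnodK) 0, hKA, hKB]
  refine List.map_congr_left (fun k hk => ?_)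
  obtain ⟨hz, hmem⟩ := hzero k hk
  have hval : (List.foldl pvStepA (PySem.Dict.ofList (pvKeys.map (fun k => (k, (0 : Int))))) ws).getD k 0
      = ((List.foldl pvStepB (PySem.Dict.ofList (pvKeys.map (fun k => (k, (0 : Int)))), ws) pvTags).1).getD k 0 := by
    rw [pv_getA, pv_getB _ _ _ _ hnodT, if_pos hmem, hz, zero_add]
  exact congrArg (fun v => (k, v)) hval
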